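-- pv_equiv track=rewrite | github.com/edt-yxz-zzd/python3_src | nn_ns/parse/unger_method - save 20150801.py | simple_gramma_parser
-- ===== SOURCE A (Python) =====
-- def simple_gramma_parser(gramma):
--     r'''generate args for UngerMethod() from a CF gramma
--
-- gramma is sth like:
--     S = a S
--     S = b
--
-- output is 2 input arguments of UngerMethod:
--     (nontoken_ref2rule_ids, rule_id2refs)
--
--
-- example:
--     >>> simple_gramma_parser('S = a S\nS = b') == \
--     ...    ({'S': ['S-0', 'S-1']}, {'S-0': ['a', 'S'], 'S-1': ['b']})
--     True
--     >>>
-- '''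
--
--     def parse_line(line):
--         words = line.split()
--         if not (len(words) >= 2 and words[1] == '='):
--             raise ValueError('bad CFG format: SHOULD BE sth like: "S = a b"')
--
--         ref = words[0]
--         refs = words[2:]
--
--         if ref not in nontoken_ref2rule_ids:
--             nontoken_ref2rule_ids[ref] = []
--
--         rks = nontoken_ref2rule_ids[ref]
--         rk = '{}-{}'.format(ref, len(rks))
--         rks.append(rk)
--
--         assert rk not in rule_id2refs
--         rule_id2refs[rk] = refs
--
--
--
--     nontoken_ref2rule_ids = {}
--     rule_id2refs = {}
--     for line in gramma.splitlines():
--         if not line or line.isspace():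
--             continue
--
--         parse_line(line)
--
--     return nontoken_ref2rule_ids, rule_id2refs
-- ===== SOURCE B (Python) =====
-- def simple_gramma_parser(gramma):
--     # Phase 1: parse the grammar text into a flat rule list [(ref, refs), ...].
--     rules = []
--     for line in gramma.splitlines():
--         if not line or line.isspace():
--             continue
--         words = line.split()
--         if len(words) < 2 or words[1] != '=':
--             raise ValueError('bad CFG format: SHOULD BE sth like: "S = a b"')
--         rules.append((words[0], words[2:]))
--     # Phase 2: number the rules per ref and build both mappings from the list.
--     counts = {}
--     rule_id2refs = {}
--     for ref, refs in rules:
--         i = counts.get(ref, 0)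
--         counts[ref] = i + 1
--         rule_id2refs['{}-{}'.format(ref, i)] = refs
--     nontoken_ref2rule_ids = {
--         ref: ['{}-{}'.format(ref, i) for i in range(c)]
--         for ref, c in counts.items()
--     }
--     return nontoken_ref2rule_ids, rule_id2refs
-- ===== Notes on version B (the rewrite author's own statement) =====
-- stated objective: alternative
-- what changed: A interleaves parsing and dict-building, mutating both output dicts (and a shared rule-id list) inside a per-line closure; B separates concerns: one pass parses the text into a flat (ref, rhs) rule list, a second pass numbers the rules with a counter dict, and the ref-to-rule-ids mapping is then emitted in closed form from the per-ref counts (a range-based comprehension) instead of by incremental appends.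
import Mathlib
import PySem

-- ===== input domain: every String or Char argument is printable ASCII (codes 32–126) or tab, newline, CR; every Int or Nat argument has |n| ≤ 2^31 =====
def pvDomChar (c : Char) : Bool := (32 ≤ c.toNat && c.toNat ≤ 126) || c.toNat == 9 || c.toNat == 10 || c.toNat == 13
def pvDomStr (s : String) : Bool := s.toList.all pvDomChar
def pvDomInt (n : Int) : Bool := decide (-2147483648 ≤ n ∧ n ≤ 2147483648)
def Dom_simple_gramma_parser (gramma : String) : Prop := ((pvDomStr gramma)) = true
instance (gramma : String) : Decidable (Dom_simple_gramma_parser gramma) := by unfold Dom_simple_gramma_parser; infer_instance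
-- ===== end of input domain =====

-- B re-decomposes A (parse to a flat rule list, then number rules and emit the id lists in
-- closed form) instead of A's interleaved mutation of both dicts; equal output, same cost.

-- ===== PORT A =====
-- A's per-line body: skip blank/whitespace lines, else parse 'ref = refs...'; a malformed
-- line raises ValueError (state becomes none; the assert in A can never fire and is a no-op).
def sgpStepA (st : Option (PySem.Dict String (List String) × PySem.Dict String (List String)))
    (line : String) : Option (PySem.Dict String (List String) × PySem.Dict String (List String)) :=
  match st with
  | none => none
  | some (nt, rid) =>
    if line == "" || PySem.Str.strIsspace line then some (nt, rid) else
    match PySem.Str.split₀ line with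
    | ref :: eq :: refs =>
      if eq = "=" then
        let nt1 := if nt.contains ref then nt else nt.insert ref ([] : List String)
        let rks := nt1.getD ref []
        let rk := ref ++ "-" ++ PySem.Int.toStr (rks.length : Int)
        some (nt1.insert ref (rks ++ [rk]), rid.insert rk refs)
      else none
    | _ => none

def simple_gramma_parser (gramma : String) : (List (String × List String)) × (List (String × List String)) :=
  match (PySem.Str.splitlines gramma).foldl sgpStepA (some (PySem.Dict.empty, PySem.Dict.empty)) with
  | some (nt, rid) => (nt.items, rid.items)
  | none => ([], [])  -- ValueError path; excluded by Pre_

-- ===== PORT B =====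
-- phase 1: one parsed rule per non-blank line, appended in line order (none = ValueError)
def sgpParseLine (acc : Option (List (String × List String))) (line : String) :
    Option (List (String × List String)) :=
  match acc with
  | none => none
  | some rules =>
    if line == "" || PySem.Str.strIsspace line then some rules else
    match PySem.Str.split₀ line with
    | ref :: eq :: refs => if eq = "=" then some (rules ++ [(ref, refs)]) else none
    | _ => none

-- phase 2 loop body: counts[ref] -> i, bump it, and file the rhs under '{ref}-{i}'
def sgpNumber (st : PySem.Dict String Int × PySem.Dict String (List String))
    (r : String × List String) : PySem.Dict String Int × PySem.Dict String (List String) :=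
  let i := st.1.getD r.1 0
  (st.1.insert r.1 (i + 1), st.2.insert (r.1 ++ "-" ++ PySem.Int.toStr i) r.2)

-- the list comprehension ['{ref}-{i}' for i in range(c)]
def sgpIds (ref : String) (c : Int) : List String :=
  (PySem.List.pyRange 0 c 1).map (fun i => ref ++ "-" ++ PySem.Int.toStr i)

-- the dict comprehension {ref: sgpIds ref c for ref, c in counts.items()}
def sgpNtOf (counts : PySem.Dict String Int) : PySem.Dict String (List String) :=
  counts.items.foldl (fun d p => d.insert p.1 (sgpIds p.1 p.2)) PySem.Dict.empty

def simple_gramma_parser_alt (gramma : String) : (List (String × List String)) × (List (String × List String)) :=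
  match (PySem.Str.splitlines gramma).foldl sgpParseLine (some []) with
  | some rules =>
    let cr := rules.foldl sgpNumber (PySem.Dict.empty, PySem.Dict.empty)
    ((sgpNtOf cr.1).items, cr.2.items)
  | none => ([], [])  -- ValueError path; excluded by Pre_

-- ===== PRECONDITION & SPEC =====
-- Pre_ excludes exactly the inputs where A raises ValueError: a non-blank line whose
-- whitespace-split does not have '=' as its second word.
def Pre_simple_gramma_parser (gramma : String) : Prop :=
  ∀ line ∈ PySem.Str.splitlines gramma,
    PySem.Str.split₀ line = [] ∨
      (2 ≤ (PySem.Str.split₀ line).length ∧ (PySem.Str.split₀ line)[1]? = some "=")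
instance (gramma : String) : Decidable (Pre_simple_gramma_parser gramma) := by
  unfold Pre_simple_gramma_parser; infer_instance

def pvWitness_simple_gramma_parser : String := "S = a S\nS = b"

def Spec_simple_gramma_parser (gramma : String) (out : (List (String × List String)) × (List (String × List String))) : Prop := out = simple_gramma_parser_alt gramma
instance (gramma : String) (out : (List (String × List String)) × (List (String × List String))) : Decidable (Spec_simple_gramma_parser gramma out) := by unfold Spec_simple_gramma_parser; infer_instance

-- ===== CLAIM (what is proved, stated in full; the proofs are below) =====
def Claim_equal_simple_gramma_parser : Prop := ∀ (gramma : String), Dom_simple_gramma_parser gramma → Pre_simple_gramma_parser gramma → Spec_simple_gramma_parser gramma (simple_gramma_parser gramma)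

-- ===== LEMMAS AND PROOFS =====

-- proof-only helper: B's two phases fused into one per-line step, matching A's loop shape
def sgpFused (st : Option (PySem.Dict String Int × PySem.Dict String (List String)))
    (line : String) : Option (PySem.Dict String Int × PySem.Dict String (List String)) :=
  match st with
  | none => none
  | some cr =>
    if line == "" || PySem.Str.strIsspace line then some cr else
    match PySem.Str.split₀ line with
    | ref :: eq :: refs => if eq = "=" then some (sgpNumber cr (ref, refs)) else none
    | _ => none

-- invariant of the counter dict: unique keys, nonnegative counts
def sgpInv (c : PySem.Dict String Int) : Prop :=
  c.keys.Nodup ∧ ∀ p ∈ c.items, 0 ≤ p.2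

lemma foldl_none {α σ : Type} (f : Option σ → α → Option σ) (h : ∀ a, f none a = none) :
    ∀ l : List α, l.foldl f none = none := by
  intro l; induction l with
  | nil => rfl
  | cons a l ih => rw [List.foldl_cons, h a, ih]

lemma sgpNtOf_items (c : PySem.Dict String Int) (h : c.keys.Nodup) :
    (sgpNtOf c).items = c.items.map (fun p => (p.1, sgpIds p.1 p.2)) := by
  unfold sgpNtOf
  rw [PySem.Dict.items_foldl_insert_fresh c.items (·.1) (fun p => sgpIds p.1 p.2)
    PySem.Dict.empty (fun a _ => rfl) h]
  rfl

lemma sgpNtOf_keys (c : PySem.Dict String Int) (h : c.keys.Nodup) :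
    (sgpNtOf c).keys = c.keys := by
  show (sgpNtOf c).items.map (·.1) = c.items.map (·.1)
  rw [sgpNtOf_items c h, List.map_map]
  rfl

lemma sgpNtOf_contains (c : PySem.Dict String Int) (h : c.keys.Nodup) (k : String) :
    (sgpNtOf c).contains k = c.contains k := by
  rw [PySem.Dict.contains_eq_decide_mem_keys, PySem.Dict.contains_eq_decide_mem_keys,
    sgpNtOf_keys c h]

lemma sgpNtOf_getD (c : PySem.Dict String Int) (h : c.keys.Nodup) {k : String} {i : Int}
    (hk : c.get? k = some i) : (sgpNtOf c).getD k [] = sgpIds k i := by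
  have hmem : (k, sgpIds k i) ∈ (sgpNtOf c).items := by
    rw [sgpNtOf_items c h]
    exact List.mem_map.mpr ⟨(k, i), PySem.Dict.mem_items_of_get?_eq_some c hk, rfl⟩
  exact PySem.Dict.getD_of_mem_items _ hmem (by rw [sgpNtOf_keys c h]; exact h) []

lemma sgpIds_succ (ref : String) (i : Int) (h : 0 ≤ i) :
    sgpIds ref (i + 1) = sgpIds ref i ++ [ref ++ "-" ++ PySem.Int.toStr i] := by
  unfold sgpIds
  rw [PySem.List.pyRange_one_succ_right h, List.map_append]
  rfl

lemma sgpIds_length (ref : String) (i : Int) (h : 0 ≤ i) :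
    ((sgpIds ref i).length : Int) = i := by
  unfold sgpIds
  rw [List.length_map, PySem.List.length_pyRange_one]
  omega

-- the crux: A's per-rule update of the nontoken dict is B's counter bump, seen through sgpNtOf
lemma sgp_ntOf_insert (c : PySem.Dict String Int) (ref : String) (h : sgpInv c) :
    (let nt := sgpNtOf c
     let nt1 := if nt.contains ref then nt else nt.insert ref ([] : List String)
     let rks := nt1.getD ref []
     nt1.insert ref (rks ++ [ref ++ "-" ++ PySem.Int.toStr (rks.length : Int)]))
      = sgpNtOf (c.insert ref (c.getD ref 0 + 1)) := by
  obtain ⟨hnd, hpos⟩ := h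
  have hnd' : (c.insert ref (c.getD ref 0 + 1)).keys.Nodup :=
    PySem.Dict.nodup_keys_insert c ref _ hnd
  by_cases hc : c.contains ref = true
  · -- ref already counted: its id list grows by one
    obtain ⟨i, hi⟩ : ∃ i, c.get? ref = some i := by
      rw [PySem.Dict.contains_eq_isSome_get?] at hc
      exact Option.isSome_iff_exists.mp hc
    have hi0 : 0 ≤ i := hpos _ (PySem.Dict.mem_items_of_get?_eq_some c hi)
    have hcnt : (sgpNtOf c).contains ref = true := by rw [sgpNtOf_contains c hnd]; exact hc
    have hgd : c.getD ref 0 = i := PySem.Dict.getD_of_get?_eq_some c 0 hi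
    simp only [hcnt, if_true, sgpNtOf_getD c hnd hi, sgpIds_length ref i hi0]
    apply PySem.Dict.ext
    rw [PySem.Dict.items_insert_of_contains _ _ hcnt, sgpNtOf_items c hnd, List.map_map,
      sgpNtOf_items _ hnd', PySem.Dict.items_insert_of_contains c _ hc, List.map_map]
    apply List.map_congr_left
    intro p _
    by_cases hp : p.1 = ref
    · simp [hp, hgd, ← sgpIds_succ ref i hi0]
    · simp [hp]
  · -- first rule for ref: the id list starts as ['{ref}-0']
    have hc' : c.contains ref = false := by
      cases hcc : c.contains ref
      · rfl
      · exact absurd hcc hc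
    have hcnt : (sgpNtOf c).contains ref = false := by rw [sgpNtOf_contains c hnd]; exact hc'
    have hgd : c.getD ref 0 = 0 := PySem.Dict.getD_of_not_contains c 0 hc'
    simp only [hcnt, Bool.false_eq_true, if_false, PySem.Dict.getD_insert_self,
      PySem.Dict.insert_insert_self, List.nil_append]
    apply PySem.Dict.ext
    rw [PySem.Dict.items_insert_of_not_contains _ _ hcnt, sgpNtOf_items c hnd,
      sgpNtOf_items _ hnd', PySem.Dict.items_insert_of_not_contains c _ hc', List.map_append]
    congr 1
    have h1 : sgpIds ref (c.getD ref 0 + 1) = [ref ++ "-" ++ PySem.Int.toStr 0] := by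
      rw [hgd, sgpIds_succ ref 0 le_rfl]
      unfold sgpIds
      rw [PySem.List.pyRange_one_eq_nil le_rfl]
      rfl
    simp only [List.map_cons, List.map_nil, h1]
    rfl

lemma sgpInv_step (c : PySem.Dict String Int) (ref : String) (h : sgpInv c) :
    sgpInv (c.insert ref (c.getD ref 0 + 1)) := by
  obtain ⟨hnd, hpos⟩ := h
  refine ⟨PySem.Dict.nodup_keys_insert c ref _ hnd, ?_⟩
  intro p hp
  rcases (PySem.Dict.mem_items_insert c ref _ p).mp hp with hp | ⟨hp, _⟩
  · subst hp
    rcases hc : c.get? ref with _ | i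
    · simp [PySem.Dict.getD_eq_get?_getD, hc]
    · have := hpos _ (PySem.Dict.mem_items_of_get?_eq_some c hc)
      simp only [PySem.Dict.getD_of_get?_eq_some c 0 hc]
      omega
  · exact hpos _ hp

-- the rule-id counter A reads off the id-list length is B's counter value
lemma sgp_rkLen (c : PySem.Dict String Int) (ref : String) (h : sgpInv c) :
    ((((if (sgpNtOf c).contains ref = true then sgpNtOf c
        else (sgpNtOf c).insert ref ([] : List String)).getD ref []).length : Int))
      = c.getD ref 0 := by
  obtain ⟨hnd, hpos⟩ := h
  by_cases hc : c.contains ref = true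
  · obtain ⟨i, hi⟩ : ∃ i, c.get? ref = some i := by
      rw [PySem.Dict.contains_eq_isSome_get?] at hc
      exact Option.isSome_iff_exists.mp hc
    have hi0 : 0 ≤ i := hpos _ (PySem.Dict.mem_items_of_get?_eq_some c hi)
    have hcnt : (sgpNtOf c).contains ref = true := by rw [sgpNtOf_contains c hnd]; exact hc
    simp [hcnt, sgpNtOf_getD c hnd hi, sgpIds_length ref i hi0,
      PySem.Dict.getD_of_get?_eq_some c 0 hi]
  · have hc' : c.contains ref = false := by
      cases hcc : c.contains ref
      · rfl
      · exact absurd hcc hc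
    have hcnt : (sgpNtOf c).contains ref = false := by rw [sgpNtOf_contains c hnd]; exact hc'
    simp [hcnt, PySem.Dict.getD_insert_self, PySem.Dict.getD_of_not_contains c 0 hc']

-- the fused step preserves the counter invariant
lemma sgpFused_inv (c c' : PySem.Dict String Int) (rid rid' : PySem.Dict String (List String))
    (line : String) (hinv : sgpInv c)
    (hf : sgpFused (some (c, rid)) line = some (c', rid')) : sgpInv c' := by
  unfold sgpFused at hf
  by_cases hskip : (line == "" || PySem.Str.strIsspace line) = true
  · simp only [hskip, if_true, Option.some_inj, Prod.mk.injEq] at hf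
    rw [← hf.1]; exact hinv
  · simp only [hskip, Bool.false_eq_true, if_false] at hf
    rcases hsp : PySem.Str.split₀ line with _ | ⟨ref, _ | ⟨eq, refs⟩⟩ <;> rw [hsp] at hf
    · cases hf
    · cases hf
    · by_cases heq : eq = "="
      · simp only [heq, if_true, Option.some_inj, sgpNumber, Prod.mk.injEq] at hf
        rw [← hf.1]; exact sgpInv_step c ref hinv
      · simp only [heq, if_false] at hf; cases hf

-- A's single step on (sgpNtOf c, rid) is the fused single step on (c, rid)
lemma sgpStepA_eq_fused (c : PySem.Dict String Int) (rid : PySem.Dict String (List String))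
    (line : String) (h : sgpInv c) :
    sgpStepA (some (sgpNtOf c, rid)) line =
      Option.map (fun cr => (sgpNtOf cr.1, cr.2)) (sgpFused (some (c, rid)) line) := by
  unfold sgpStepA sgpFused
  by_cases hskip : (line == "" || PySem.Str.strIsspace line) = true
  · simp only [hskip, if_true, Option.map_some]
  · simp only [hskip, Bool.false_eq_true, if_false]
    rcases hsp : PySem.Str.split₀ line with _ | ⟨ref, _ | ⟨eq, refs⟩⟩
    · rfl
    · rfl
    · by_cases heq : eq = "="
      · simp only [heq, if_true, Option.map_some, sgpNumber]
        rw [sgp_ntOf_insert c ref h, sgp_rkLen c ref h]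
      · simp [heq]

-- A's fold equals the fused fold, through sgpNtOf
lemma sgp_main (lines : List String) :
    ∀ (c : PySem.Dict String Int) (rid : PySem.Dict String (List String)), sgpInv c →
    lines.foldl sgpStepA (some (sgpNtOf c, rid)) =
      Option.map (fun cr => (sgpNtOf cr.1, cr.2)) (lines.foldl sgpFused (some (c, rid))) := by
  induction lines with
  | nil => intro c rid _; rfl
  | cons line lines ih =>
    intro c rid hinv
    rw [List.foldl_cons, List.foldl_cons, sgpStepA_eq_fused c rid line hinv]
    rcases hf : sgpFused (some (c, rid)) line with _ | cr
    · rw [Option.map_none, foldl_none _ (fun a => rfl),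
        foldl_none _ (fun a => rfl), Option.map_none]
    · rcases cr with ⟨c', rid'⟩
      have hinv' : sgpInv c' := sgpFused_inv c c' rid rid' line hinv hf
      rw [Option.map_some]
      exact ih c' rid' hinv'

-- the fused fold is B's parse phase followed by B's numbering fold
lemma sgp_fuse (lines : List String) :
    ∀ (rules : List (String × List String)) (c : PySem.Dict String Int)
      (rid : PySem.Dict String (List String)),
    lines.foldl sgpFused (some (rules.foldl sgpNumber (c, rid))) =
      Option.map (fun rs => rs.foldl sgpNumber (c, rid)) (lines.foldl sgpParseLine (some rules)) := by
  induction lines with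
  | nil => intro rules c rid; rfl
  | cons line lines ih =>
    intro rules c rid
    rw [List.foldl_cons, List.foldl_cons]
    by_cases hskip : (line == "" || PySem.Str.strIsspace line) = true
    · have h1 : sgpFused (some (rules.foldl sgpNumber (c, rid))) line
          = some (rules.foldl sgpNumber (c, rid)) := by
        unfold sgpFused; dsimp only; rw [if_pos hskip]
      have h2 : sgpParseLine (some rules) line = some rules := by
        unfold sgpParseLine; dsimp only; rw [if_pos hskip]
      rw [h1, h2]; exact ih rules c rid
    · rcases hsp : PySem.Str.split₀ line with _ | ⟨ref, _ | ⟨eq, refs⟩⟩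
      · have h1 : sgpFused (some (rules.foldl sgpNumber (c, rid))) line = none := by
          unfold sgpFused; dsimp only; rw [if_neg hskip, hsp]
        have h2 : sgpParseLine (some rules) line = none := by
          unfold sgpParseLine; dsimp only; rw [if_neg hskip, hsp]
        rw [h1, h2, foldl_none _ (fun a => rfl), foldl_none _ (fun a => rfl)]; rfl
      · have h1 : sgpFused (some (rules.foldl sgpNumber (c, rid))) line = none := by
          unfold sgpFused; dsimp only; rw [if_neg hskip, hsp]
        have h2 : sgpParseLine (some rules) line = none := by
          unfold sgpParseLine; dsimp only; rw [if_neg hskip, hsp]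
        rw [h1, h2, foldl_none _ (fun a => rfl), foldl_none _ (fun a => rfl)]; rfl
      · by_cases heq : eq = "="
        · have h1 : sgpFused (some (rules.foldl sgpNumber (c, rid))) line
              = some ((rules ++ [(ref, refs)]).foldl sgpNumber (c, rid)) := by
            unfold sgpFused; dsimp only; rw [if_neg hskip, hsp]
            simp [heq, List.foldl_append]
          have h2 : sgpParseLine (some rules) line = some (rules ++ [(ref, refs)]) := by
            unfold sgpParseLine; dsimp only; rw [if_neg hskip, hsp]; simp [heq]
          rw [h1, h2]; exact ih (rules ++ [(ref, refs)]) c rid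
        · have h1 : sgpFused (some (rules.foldl sgpNumber (c, rid))) line = none := by
            unfold sgpFused; dsimp only; rw [if_neg hskip, hsp]; simp [heq]
          have h2 : sgpParseLine (some rules) line = none := by
            unfold sgpParseLine; dsimp only; rw [if_neg hskip, hsp]; simp [heq]
          rw [h1, h2, foldl_none _ (fun a => rfl), foldl_none _ (fun a => rfl)]; rfl

-- ===== VERDICT (by name: the statement is the Claim_ definition above) =====
theorem simple_gramma_parser_spec : Claim_equal_simple_gramma_parser := by
  intro gramma _ _
  unfold Spec_simple_gramma_parser simple_gramma_parser simple_gramma_parser_alt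
  have h0 : (some (PySem.Dict.empty, PySem.Dict.empty) :
      Option (PySem.Dict String (List String) × PySem.Dict String (List String)))
      = some (sgpNtOf PySem.Dict.empty, PySem.Dict.empty) := rfl
  rw [h0, sgp_main _ PySem.Dict.empty PySem.Dict.empty ⟨List.nodup_nil, by intro p hp; cases hp⟩]
  have h1 := sgp_fuse (PySem.Str.splitlines gramma) [] PySem.Dict.empty PySem.Dict.empty
  rw [List.foldl_nil] at h1
  rw [h1]
  rcases (PySem.Str.splitlines gramma).foldl sgpParseLine (some []) with _ | rules
  · rfl
  · rfl
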